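-- pv_equiv track=rewrite | github.com/maruyacoding/coding-test | 코딩테스트 - 프로그래머스/Level 1/12. 부족한 금액 계산하기.py | solution
-- ===== SOURCE A (Python) =====
-- def solution(price, money, count):
--     result, cnt = 0, 0
--     for i in range(1, count + 1) :
--         cnt += i
--     total = price * cnt
--     result = total - money
--     if total <= money :
--         return 0
--     return result
-- ===== SOURCE B (Python) =====
-- def solution(price, money, count):
--     n = max(count, 0)
--     total = price * (n * (n + 1) // 2)
--     return max(total - money, 0)
-- ===== Notes on version B (the rewrite author's own statement) =====
-- stated objective: faster
-- what changed: Replaces the O(count) loop summing 1..count with the closed-form triangular number count*(count+1)//2 and a max() instead of the branch.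
import Mathlib
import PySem

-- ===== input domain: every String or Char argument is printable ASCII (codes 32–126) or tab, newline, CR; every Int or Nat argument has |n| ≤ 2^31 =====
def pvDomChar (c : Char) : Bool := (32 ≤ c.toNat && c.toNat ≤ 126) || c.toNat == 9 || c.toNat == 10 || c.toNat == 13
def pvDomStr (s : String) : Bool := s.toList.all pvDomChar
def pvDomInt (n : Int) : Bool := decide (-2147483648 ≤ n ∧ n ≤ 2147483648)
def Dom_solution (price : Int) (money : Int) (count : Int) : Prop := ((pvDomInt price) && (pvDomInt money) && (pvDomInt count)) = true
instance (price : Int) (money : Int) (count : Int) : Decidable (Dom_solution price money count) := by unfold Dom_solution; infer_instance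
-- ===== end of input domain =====

-- B computes the shortfall with the closed-form triangular sum count*(count+1)//2 instead of A's O(count) loop.

-- ===== PORT A =====
def solution (price : Int) (money : Int) (count : Int) : Int :=
  let cnt : Int := (PySem.List.pyRange 1 (count + 1) 1).foldl (fun acc i => acc + i) 0
  let total := price * cnt
  let result := total - money
  if total ≤ money then 0 else result

-- ===== PORT B =====
def solution_alt (price : Int) (money : Int) (count : Int) : Int :=
  let n := max count 0
  let total := price * PySem.Int.floordiv (n * (n + 1)) 2
  max (total - money) 0

-- ===== PRECONDITION & SPEC =====
def Spec_solution (price : Int) (money : Int) (count : Int) (out : Int) : Prop := out = solution_alt price money count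
instance (price : Int) (money : Int) (count : Int) (out : Int) : Decidable (Spec_solution price money count out) := by unfold Spec_solution; infer_instance

-- ===== CLAIM (what is proved, stated in full; the proofs are below) =====
def Claim_equal_solution : Prop := ∀ (price : Int) (money : Int) (count : Int), Dom_solution price money count → Spec_solution price money count (solution price money count)

-- ===== LEMMAS AND PROOFS =====

-- twice the loop's sum of 1..k equals k*(k+1)
theorem pv_sum_range (k : Nat) :
    2 * (PySem.List.pyRange 1 ((k : Int) + 1) 1).foldl (fun acc i => acc + i) 0
      = (k : Int) * ((k : Int) + 1) := by
  induction k with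
  | zero =>
      rw [PySem.List.pyRange_one_eq_nil (by norm_num)]
      simp
  | succ n ih =>
      have hc : ((n + 1 : Nat) : Int) + 1 = ((n : Int) + 1) + 1 := by push_cast; ring
      rw [hc, PySem.List.pyRange_one_succ_right (by omega : (1 : Int) ≤ (n : Int) + 1),
          List.foldl_append]
      simp only [List.foldl_cons, List.foldl_nil]
      push_cast
      nlinarith [ih]

theorem pv_cnt_eq (count : Int) :
    (PySem.List.pyRange 1 (count + 1) 1).foldl (fun acc i => acc + i) 0
      = PySem.Int.floordiv (max count 0 * (max count 0 + 1)) 2 := by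
  by_cases h : count ≤ 0
  · rw [PySem.List.pyRange_one_eq_nil (by omega)]
    have hm : max count 0 = 0 := by omega
    rw [hm]
    simp
  · have hm : max count 0 = count := by omega
    have hk : ((count.toNat : Int)) = count := by omega
    have := pv_sum_range count.toNat
    rw [hk] at this
    rw [hm, PySem.Int.floordiv_eq_ediv_of_pos (by norm_num : (0:Int) < 2), ← this,
        Int.mul_ediv_cancel_left _ (by norm_num)]

-- ===== VERDICT (by name: the statement is the Claim_ definition above) =====
theorem solution_spec : Claim_equal_solution := by
  intro price money count _
  unfold Spec_solution solution solution_alt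
  rw [pv_cnt_eq]
  set t := price * PySem.Int.floordiv (max count 0 * (max count 0 + 1)) 2 with ht
  simp only []
  omega
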